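-- pv_equiv track=rewrite | github.com/SharadhaKasiviswanathan/ROI-Flow | artifacts/python-api/app/classifier.py | suggest_tool_stack
-- ===== SOURCE A (Python) =====
-- from typing import List, Tuple
--
-- def suggest_tool_stack(apps: List[str]) -> List[str]:
--     tools = {"n8n"}
--     for app in apps:
--         if "Gmail" in app or "Email" in app:
--             tools.add("Gmail Node")
--         if "Slack" in app:
--             tools.add("Slack Node")
--         if "Google Sheets" in app:
--             tools.add("Google Sheets Node")
--         if "CRM" in app:
--             tools.add("HTTP Request Node")
--         if "QuickBooks" in app:
--             tools.add("QuickBooks Node")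
--         if "Webhook" in app:
--             tools.add("Webhook Node")
--     tools.add("IF Node")
--     tools.add("Set Node")
--     return sorted(tools)
-- ===== SOURCE B (Python) =====
-- # B: no set, no sort — join apps into one newline-separated blob, test each keyword on the
-- # blob once, and emit the output by filtering a menu already written in sorted order.
-- from typing import List
--
-- def suggest_tool_stack(apps: List[str]) -> List[str]:
--     blob = "\n".join(apps)
--     menu = [
--         ("Gmail Node", "Gmail" in blob or "Email" in blob),
--         ("Google Sheets Node", "Google Sheets" in blob),
--         ("HTTP Request Node", "CRM" in blob),
--         ("IF Node", True),
--         ("QuickBooks Node", "QuickBooks" in blob),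
--         ("Set Node", True),
--         ("Slack Node", "Slack" in blob),
--         ("Webhook Node", "Webhook" in blob),
--         ("n8n", True),
--     ]
--     return [tool for tool, wanted in menu if wanted]
-- ===== Notes on version B (the rewrite author's own statement) =====
-- stated objective: faster
-- what changed: B drops A's set and final sort entirely: it joins all apps into one newline-separated blob, tests each of the 7 keywords once on that single string (correct because no keyword contains a newline), and produces the result by filtering a candidate menu already written in sorted order.
import Mathlib
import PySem

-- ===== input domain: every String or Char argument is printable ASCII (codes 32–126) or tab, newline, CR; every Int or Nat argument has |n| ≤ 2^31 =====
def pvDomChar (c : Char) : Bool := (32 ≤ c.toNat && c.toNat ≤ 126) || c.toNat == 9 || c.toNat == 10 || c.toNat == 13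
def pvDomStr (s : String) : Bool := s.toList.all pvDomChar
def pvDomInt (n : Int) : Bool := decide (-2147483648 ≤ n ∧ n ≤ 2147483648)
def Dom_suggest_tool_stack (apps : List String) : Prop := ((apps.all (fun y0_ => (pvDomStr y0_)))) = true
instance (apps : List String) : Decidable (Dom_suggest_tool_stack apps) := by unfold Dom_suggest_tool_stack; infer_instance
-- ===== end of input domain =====

-- B drops A's set and final sort: it joins all apps into one newline-separated blob, tests each
-- keyword once on that single string, and filters a candidate menu already written in sorted order.

-- ===== PORT A =====
def stepA (t : PySem.Set String) (app : String) : PySem.Set String :=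
  let t := if PySem.Str.isIn "Gmail" app || PySem.Str.isIn "Email" app then PySem.Set.add t "Gmail Node" else t
  let t := if PySem.Str.isIn "Slack" app then PySem.Set.add t "Slack Node" else t
  let t := if PySem.Str.isIn "Google Sheets" app then PySem.Set.add t "Google Sheets Node" else t
  let t := if PySem.Str.isIn "CRM" app then PySem.Set.add t "HTTP Request Node" else t
  let t := if PySem.Str.isIn "QuickBooks" app then PySem.Set.add t "QuickBooks Node" else t
  let t := if PySem.Str.isIn "Webhook" app then PySem.Set.add t "Webhook Node" else t
  t

def suggest_tool_stack (apps : List String) : List String :=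
  let tools : PySem.Set String := PySem.Set.ofList ["n8n"]
  let tools := apps.foldl stepA tools
  let tools := PySem.Set.add tools "IF Node"
  let tools := PySem.Set.add tools "Set Node"
  PySem.List.sorted tools (fun x => x) false

-- ===== PORT B =====
def pvMenu (blob : String) : List (String × Bool) :=
  [("Gmail Node", PySem.Str.isIn "Gmail" blob || PySem.Str.isIn "Email" blob),
   ("Google Sheets Node", PySem.Str.isIn "Google Sheets" blob),
   ("HTTP Request Node", PySem.Str.isIn "CRM" blob),
   ("IF Node", true),
   ("QuickBooks Node", PySem.Str.isIn "QuickBooks" blob),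
   ("Set Node", true),
   ("Slack Node", PySem.Str.isIn "Slack" blob),
   ("Webhook Node", PySem.Str.isIn "Webhook" blob),
   ("n8n", true)]

def suggest_tool_stack_alt (apps : List String) : List String :=
  let blob := PySem.Str.join "\n" apps
  ((pvMenu blob).filter (fun p => p.2)).map (fun p => p.1)

-- ===== PRECONDITION & SPEC =====
def Spec_suggest_tool_stack (apps : List String) (out : List String) : Prop := out = suggest_tool_stack_alt apps
instance (apps : List String) (out : List String) : Decidable (Spec_suggest_tool_stack apps out) := by unfold Spec_suggest_tool_stack; infer_instance

-- ===== CLAIM (what is proved, stated in full; the proofs are below) =====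
def Claim_equal_suggest_tool_stack : Prop := ∀ (apps : List String), Dom_suggest_tool_stack apps → Spec_suggest_tool_stack apps (suggest_tool_stack apps)

-- ===== LEMMAS AND PROOFS =====

-- a keyword avoiding the separator char is an infix of u ++ c :: v iff it is an infix of a side
lemma infix_append_cons {kw u v : List Char} {c : Char} (hc : c ∉ kw) :
    kw <:+: u ++ c :: v ↔ kw <:+: u ∨ kw <:+: v := by
  constructor
  · rintro ⟨s, t, h⟩
    have hpre : kw <+: (u ++ c :: v).drop s.length := by
      refine ⟨t, ?_⟩
      have := congrArg (List.drop s.length) h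
      simpa [List.append_assoc] using this
    by_cases h1 : s.length + kw.length ≤ u.length
    · left
      have hd : (u ++ c :: v).drop s.length = u.drop s.length ++ c :: v := by
        rw [List.drop_append]
        have h0 : s.length - u.length = 0 := by omega
        simp [h0]
      rw [hd] at hpre
      have hkw : kw = (u.drop s.length).take kw.length := by
        have h2 := List.prefix_iff_eq_take.mp hpre
        have hlen : (u.drop s.length).length = u.length - s.length := by simp
        have h3 : kw.length - (u.drop s.length).length = 0 := by omega
        have h4 : (u.drop s.length ++ c :: v).take kw.length = (u.drop s.length).take kw.length := by
          rw [List.take_append, h3, List.take_zero, List.append_nil]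
        exact h2.trans h4
      rw [hkw]
      exact ((u.drop s.length).take_prefix kw.length).isInfix.trans (u.drop_suffix s.length).isInfix
    · by_cases h2 : u.length < s.length
      · right
        have hd : (u ++ c :: v).drop s.length = v.drop (s.length - u.length - 1) := by
          rw [List.drop_append]
          have hu : u.drop s.length = [] := by
            apply List.drop_eq_nil_of_le; omega
          rw [hu]
          have he : s.length - u.length = (s.length - u.length - 1) + 1 := by omega
          rw [he, List.drop_succ_cons, List.nil_append]
          congr 1
        rw [hd] at hpre
        exact hpre.isInfix.trans (v.drop_suffix _).isInfix
      · -- s.length ≤ u.length < s.length + kw.length : c would land inside kw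
        exfalso
        have hd : (u ++ c :: v).drop s.length = u.drop s.length ++ c :: v := by
          rw [List.drop_append]
          have h0 : s.length - u.length = 0 := by omega
          simp [h0]
        rw [hd] at hpre
        have hidx : u.length - s.length < kw.length := by omega
        have hlen : (u.drop s.length).length = u.length - s.length := by simp
        have hget : kw[u.length - s.length]'hidx = c := by
          have h3 := hpre.getElem hidx
          rw [h3, List.getElem_append_right (by omega)]
          simp [hlen]
        exact hc (hget ▸ List.getElem_mem hidx)
  · rintro (h | h)
    · exact h.trans ⟨[], c :: v, rfl⟩
    · exact h.trans ⟨u ++ [c], [], by simp⟩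

lemma isIn_joinChars (kw : List Char) (c : Char) (hc : c ∉ kw) (hne : kw ≠ [])
    (ls : List (List Char)) :
    PySem.Chars.isIn kw (PySem.Chars.join [c] ls) = true ↔ ∃ l ∈ ls, PySem.Chars.isIn kw l = true := by
  induction ls with
  | nil =>
    simp [PySem.Chars.join_nil, PySem.Chars.isIn_iff_infix, hne]
  | cons a t ih =>
    cases t with
    | nil => simp [PySem.Chars.join_singleton]
    | cons b t' =>
      rw [PySem.Chars.join_cons_cons]
      simp only [PySem.Chars.isIn_iff_infix] at ih ⊢
      rw [show a ++ [c] ++ PySem.Chars.join [c] (b :: t') = a ++ c :: PySem.Chars.join [c] (b :: t') by simp]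
      rw [infix_append_cons hc, ih]
      simp only [List.exists_mem_cons_iff]

lemma isIn_blob (kw : String) (hc : '\n' ∉ kw.toList) (hne : kw.toList ≠ []) (apps : List String) :
    PySem.Str.isIn kw (PySem.Str.join "\n" apps) = true ↔ ∃ a ∈ apps, PySem.Str.isIn kw a = true := by
  simp only [PySem.Str.isIn_eq, PySem.Str.toList_join]
  rw [show "\n".toList = ['\n'] from rfl]
  rw [isIn_joinChars kw.toList '\n' hc hne]
  constructor
  · rintro ⟨l, hl, h⟩
    obtain ⟨a, ha, rfl⟩ := List.mem_map.mp hl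
    exact ⟨a, ha, h⟩
  · rintro ⟨a, ha, h⟩
    exact ⟨a.toList, List.mem_map.mpr ⟨a, ha, rfl⟩, h⟩

-- the tools contributed by A's loop
def loopCond (apps : List String) (x : String) : Prop :=
  ((∃ a ∈ apps, (PySem.Str.isIn "Gmail" a || PySem.Str.isIn "Email" a) = true) ∧ x = "Gmail Node")
  ∨ ((∃ a ∈ apps, PySem.Str.isIn "Slack" a = true) ∧ x = "Slack Node")
  ∨ ((∃ a ∈ apps, PySem.Str.isIn "Google Sheets" a = true) ∧ x = "Google Sheets Node")
  ∨ ((∃ a ∈ apps, PySem.Str.isIn "CRM" a = true) ∧ x = "HTTP Request Node")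
  ∨ ((∃ a ∈ apps, PySem.Str.isIn "QuickBooks" a = true) ∧ x = "QuickBooks Node")
  ∨ ((∃ a ∈ apps, PySem.Str.isIn "Webhook" a = true) ∧ x = "Webhook Node")

-- the common membership characterisation of both results
def condTools (apps : List String) (x : String) : Prop :=
  x = "n8n" ∨ x = "IF Node" ∨ x = "Set Node" ∨ loopCond apps x

lemma mem_addIf {c : Prop} [Decidable c] (t : PySem.Set String) (y x : String) :
    x ∈ (if c then PySem.Set.add t y else t) ↔ x ∈ t ∨ (c ∧ x = y) := by
  split_ifs with h <;> simp [PySem.Set.mem_add] <;> tauto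

lemma shuffleT6 {t d1 d2 d3 d4 d5 d6 : Prop} :
    ((((((t ∨ d1) ∨ d2) ∨ d3) ∨ d4) ∨ d5) ∨ d6) ↔ t ∨ (d1 ∨ d2 ∨ d3 ∨ d4 ∨ d5 ∨ d6) := by tauto

lemma orShuffle6 {a1 b1 a2 b2 a3 b3 a4 b4 a5 b5 a6 b6 : Prop} :
    ((a1 ∨ b1) ∨ (a2 ∨ b2) ∨ (a3 ∨ b3) ∨ (a4 ∨ b4) ∨ (a5 ∨ b5) ∨ (a6 ∨ b6)) ↔
    ((a1 ∨ a2 ∨ a3 ∨ a4 ∨ a5 ∨ a6) ∨ (b1 ∨ b2 ∨ b3 ∨ b4 ∨ b5 ∨ b6)) := by tauto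

lemma mem_stepA (t : PySem.Set String) (app : String) (x : String) :
    x ∈ stepA t app ↔ x ∈ t ∨ loopCond [app] x := by
  simp only [stepA, mem_addIf, loopCond, List.mem_singleton, exists_eq_left]
  exact shuffleT6

lemma loopCond_cons (a : String) (as : List String) (x : String) :
    loopCond (a :: as) x ↔ loopCond [a] x ∨ loopCond as x := by
  simp only [loopCond, List.exists_mem_cons_iff, or_and_right, List.mem_singleton,
    exists_eq_left]
  exact orShuffle6

lemma mem_foldA (apps : List String) (t : PySem.Set String) (x : String) :
    x ∈ apps.foldl stepA t ↔ x ∈ t ∨ loopCond apps x := by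
  induction apps generalizing t with
  | nil => simp [loopCond]
  | cons a as ih => rw [List.foldl_cons, ih, mem_stepA, loopCond_cons a as x, or_assoc]

-- the set A sorts at the end
def setA (apps : List String) : PySem.Set String :=
  PySem.Set.add (PySem.Set.add (apps.foldl stepA (PySem.Set.ofList ["n8n"])) "IF Node") "Set Node"

lemma mem_setA (apps : List String) (x : String) :
    x ∈ setA apps ↔ condTools apps x := by
  simp only [setA, PySem.Set.mem_add, mem_foldA, PySem.Set.mem_ofList, List.mem_singleton,
    condTools]
  tauto

lemma nodup_setA (apps : List String) : (setA apps).Nodup := by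
  apply PySem.Set.nodup_add
  apply PySem.Set.nodup_add
  have : ∀ (l : List String) (t : PySem.Set String), t.Nodup → (l.foldl stepA t).Nodup := by
    intro l
    induction l with
    | nil => intro t h; exact h
    | cons a as ih =>
      intro t h
      apply ih
      unfold stepA
      split_ifs <;> repeat first | exact PySem.Set.nodup_add _ _ h | apply PySem.Set.nodup_add | exact h
  exact this apps _ (PySem.Set.nodup_ofList _)

lemma splitOr (l : List String) (p q : String → Bool) :
    (∃ a ∈ l, (p a || q a) = true) ↔ (∃ a ∈ l, p a = true) ∨ (∃ a ∈ l, q a = true) := by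
  constructor
  · rintro ⟨a, ha, h⟩
    rcases Bool.or_eq_true_iff.mp h with h | h
    · exact Or.inl ⟨a, ha, h⟩
    · exact Or.inr ⟨a, ha, h⟩
  · rintro (⟨a, ha, h⟩ | ⟨a, ha, h⟩) <;> exact ⟨a, ha, by simp [h]⟩

lemma menuShuffle {t1 t2 t3 t4 t5 t6 t7 t8 t9 g e gs c q s w : Prop} :
    (t1 ∧ (g ∨ e)) ∨ (t2 ∧ gs) ∨ (t3 ∧ c) ∨ t4 ∨ (t5 ∧ q) ∨ t6 ∨ (t7 ∧ s) ∨ (t8 ∧ w) ∨ t9 ↔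
    t9 ∨ t4 ∨ t6 ∨ ((g ∨ e) ∧ t1) ∨ (s ∧ t7) ∨ (gs ∧ t2) ∨ (c ∧ t3) ∨ (q ∧ t5) ∨ (w ∧ t8) := by
  tauto

lemma mem_fm (l : List (String × Bool)) (x : String) :
    x ∈ (l.filter (fun p => p.2)).map (fun p => p.1) ↔ (x, true) ∈ l := by
  simp only [List.mem_map, List.mem_filter]
  constructor
  · rintro ⟨⟨a, b⟩, ⟨hm, hb⟩, rfl⟩
    simp only at hb
    subst hb
    exact hm
  · intro h
    exact ⟨(x, true), ⟨h, rfl⟩, rfl⟩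

lemma mem_B (apps : List String) (x : String) :
    x ∈ suggest_tool_stack_alt apps ↔ condTools apps x := by
  have hG := isIn_blob "Gmail" (by decide) (by decide) apps
  have hE := isIn_blob "Email" (by decide) (by decide) apps
  have hS := isIn_blob "Slack" (by decide) (by decide) apps
  have hGS := isIn_blob "Google Sheets" (by decide) (by decide) apps
  have hC := isIn_blob "CRM" (by decide) (by decide) apps
  have hQ := isIn_blob "QuickBooks" (by decide) (by decide) apps
  have hW := isIn_blob "Webhook" (by decide) (by decide) apps
  unfold suggest_tool_stack_alt
  rw [mem_fm]
  simp only [pvMenu, List.mem_cons, List.not_mem_nil, or_false, Prod.mk.injEq, and_true,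
    @eq_comm Bool true, Bool.or_eq_true]
  simp only [hG, hE, hS, hGS, hC, hQ, hW]
  simp only [condTools, loopCond, splitOr]
  exact menuShuffle

lemma pairwise_B (apps : List String) :
    (suggest_tool_stack_alt apps).Pairwise (fun a b => a < b) := by
  have hmenu : ((pvMenu (PySem.Str.join "\n" apps)).map (fun p => p.1)).Pairwise (fun a b : String => a < b) := by
    simp only [pvMenu, List.map]
    have hc : List.IsChain (fun a b : String => a < b)
        ["Gmail Node", "Google Sheets Node", "HTTP Request Node", "IF Node", "QuickBooks Node",
         "Set Node", "Slack Node", "Webhook Node", "n8n"] := by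
      simp only [List.isChain_cons_cons, List.isChain_singleton, and_true, String.lt_iff_toList_lt]
      refine ⟨?_, ?_, ?_, ?_, ?_, ?_, ?_, ?_⟩ <;> decide
    exact List.isChain_iff_pairwise.mp hc
  have hsub : (((pvMenu (PySem.Str.join "\n" apps)).filter (fun p => p.2)).map (fun p => p.1)).Sublist
      ((pvMenu (PySem.Str.join "\n" apps)).map (fun p => p.1)) :=
    List.Sublist.map _ List.filter_sublist
  exact hmenu.sublist hsub

-- ===== VERDICT (by name: the statement is the Claim_ definition above) =====
theorem suggest_tool_stack_spec : Claim_equal_suggest_tool_stack := by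
  intro apps _
  unfold Spec_suggest_tool_stack
  have hA : suggest_tool_stack apps = PySem.List.sorted (setA apps) (fun x => x) false := rfl
  have hnodupB : (suggest_tool_stack_alt apps).Nodup :=
    (pairwise_B apps).imp ne_of_lt
  have hperm : (suggest_tool_stack_alt apps).Perm (setA apps) :=
    (List.perm_ext_iff_of_nodup hnodupB (nodup_setA apps)).mpr
      (fun x => (mem_B apps x).trans (mem_setA apps x).symm)
  rw [hA]
  exact PySem.List.sorted_eq_of_perm_of_pairwise_lt _ _ _ hperm (pairwise_B apps)
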